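-- pv_equiv track=rewrite | github.com/YH-edenbro/SSAFY_APS | py/string1.py | make_palindrome
-- ===== SOURCE A (Python) =====
-- def make_palindrome(arr, N, le):
--
--     a = 0  # 회문 개수
--     # 가로 배열 회문 검사
--     for i in range(N):
--         for j in range(N - le + 1):
--             b = 0  # 주어진 길이의 문자열을 반을 갈라 검사한 수
--             for k in range(le//2):
--                 if arr[i][j+k] != arr[i][j + le - 1 - k]:
--                     break
--                 else:
--                     b += 1
--             if b == (le//2):  # 주어진 길이의 문자열을 반을 갈라 검사한 수와 반을 가른 수가 같아야 회문
--                 a += 1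
--
--     # 세로 배열 회문 검사
--     for j in range(N):
--         for i in range(N - le + 1):
--             b = 0
--             for k in range(le//2):
--                 if arr[i+k][j] != arr[i + le - 1 - k][j]:
--                     break
--                 else:
--                     b += 1
--             if b == (le // 2):
--                 a += 1
--
--     return a
-- ===== SOURCE B (Python) =====
-- def make_palindrome(arr, N, le):
--     m = N - le + 1
--     if m <= 0:
--         return 0
--     rows = [arr[i][:N] for i in range(N)]
--     cols = [''.join(row[j] for row in rows) for j in range(N)]
--     total = 0
--     for s in rows + cols:
--         # layered DP: grow palindromes two characters at a time;
--         # pal[j] means s[j:j+l] is a palindrome for the current layer length l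
--         l = le % 2
--         pal = [True] * (N - l + 1)
--         while l < le:
--             l += 2
--             pal = [pal[j + 1] and s[j] == s[j + l - 1] for j in range(N - l + 1)]
--         total += sum(pal)
--     return total
-- ===== Notes on version B (the rewrite author's own statement) =====
-- stated objective: alternative
-- what changed: replaces A's per-window mirrored half-comparison (three nested index loops with a break-counter) by a length-layered dynamic program that grows palindromes two characters at a time, pal_l[j] = pal_{l-2}[j+1] and s[j]==s[j+l-1], run over the truncated rows and explicitly built column strings
-- outside the precondition, e.g. on make_palindrome(['ab', 'cd'], 2, -1): A returns 0, B returns 8; on make_palindrome(['a'], 2, 1): A returns 8, B raises IndexError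
import Mathlib
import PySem

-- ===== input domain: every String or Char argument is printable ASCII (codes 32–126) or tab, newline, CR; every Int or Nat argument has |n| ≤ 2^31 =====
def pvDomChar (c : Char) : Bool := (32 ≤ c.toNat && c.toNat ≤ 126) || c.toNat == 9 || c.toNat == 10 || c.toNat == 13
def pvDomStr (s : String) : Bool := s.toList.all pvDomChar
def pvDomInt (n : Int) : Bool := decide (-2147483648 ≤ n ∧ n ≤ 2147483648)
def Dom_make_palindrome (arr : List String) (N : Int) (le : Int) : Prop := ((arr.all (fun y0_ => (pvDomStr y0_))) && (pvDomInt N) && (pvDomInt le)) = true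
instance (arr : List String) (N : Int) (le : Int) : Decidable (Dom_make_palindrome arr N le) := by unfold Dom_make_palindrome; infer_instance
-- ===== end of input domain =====

-- B replaces A's per-window mirrored half-comparison (break-counter compared against le//2) by a
-- length-layered DP that grows palindromes two characters at a time (pal_l[j] = pal_{l-2}[j+1]
-- and s[j]==s[j+l-1]) over the truncated rows and explicitly built column strings.
-- Objective: alternative; equivalence proved on Pre_ (below).


-- ===== PORT A =====
-- arr[i][x]; the defaults are unreachable on inputs admitted by Pre_ (Python would raise there)
def pvAt (arr : List String) (i x : Int) : Char :=
  PySem.List.pyGetD (PySem.List.pyGetD arr i "").toList x ' '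

-- 'b = 0; for k in ks: if cmp(k): break; else: b += 1' — returns the final b
def pvBrk (cmp : Int → Bool) : List Int → Int
  | [] => 0
  | k :: ks => if cmp k then 0 else 1 + pvBrk cmp ks

def make_palindrome (arr : List String) (N : Int) (le : Int) : Int :=
  let h := PySem.Int.floordiv le 2
  -- horizontal scan
  let a1 := (PySem.List.pyRange 0 N).foldl (fun a i =>
      (PySem.List.pyRange 0 (N - le + 1)).foldl (fun a j =>
        let b := pvBrk (fun k => pvAt arr i (j + k) != pvAt arr i (j + le - 1 - k))
                       (PySem.List.pyRange 0 h)
        if b = h then a + 1 else a) a) 0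
  -- vertical scan
  (PySem.List.pyRange 0 N).foldl (fun a j =>
      (PySem.List.pyRange 0 (N - le + 1)).foldl (fun a i =>
        let b := pvBrk (fun k => pvAt arr (i + k) j != pvAt arr (i + le - 1 - k) j)
                       (PySem.List.pyRange 0 h)
        if b = h then a + 1 else a) a) a1

-- ===== PORT B =====
-- one iteration of 'while l < le: l += 2; pal = [pal[j+1] and s[j] == s[j+l-1] for j in range(N-l+1)]'
-- (called with the already-incremented l; the indices are in range wherever Python's are)
def pvLayerStep (s : List Char) (N l : Int) (pal : List Bool) : List Bool :=
  (PySem.List.pyRange 0 (N - l + 1)).map (fun j =>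
    PySem.List.pyGetD pal (j + 1) false &&
    (PySem.List.pyGetD s j ' ' == PySem.List.pyGetD s (j + l - 1) ' '))

-- the while loop itself; fuel = its iteration count
def pvLayers (s : List Char) (N : Int) : Nat → Int → List Bool → List Bool
  | 0, _, pal => pal
  | n + 1, l, pal => pvLayers s N n (l + 2) (pvLayerStep s N (l + 2) pal)

def make_palindrome_alt (arr : List String) (N : Int) (le : Int) : Int :=
  let m := N - le + 1
  if m ≤ 0 then 0
  else
    let rows := (PySem.List.pyRange 0 N).map (fun i =>
        PySem.List.slice (PySem.List.pyGetD arr i "").toList none (some N))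
    let cols := (PySem.List.pyRange 0 N).map (fun j =>
        rows.map (fun row => PySem.List.pyGetD row j ' '))
    (rows ++ cols).foldl (fun total s =>
      let l0 := PySem.Int.mod le 2
      let pal := pvLayers s N ((le - l0) / 2).toNat l0
                   (List.replicate (N - l0 + 1).toNat true)
      total + ((pal.countP id : Nat) : Int)) 0

-- ===== PRECONDITION & SPEC =====
-- Pre_ excludes (a) negative le with N > 0, where A returns 0 only because its counter test
-- 'b == le//2' can never hold while B's base DP layer counts every position, and
-- (b) grids smaller than N×N when there is at least one window (le ≤ N), on which A (for le ≤ 1)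
-- returns a window count without ever reading the grid while B must index the missing
-- rows/columns and raises IndexError.
def Pre_make_palindrome (arr : List String) (N : Int) (le : Int) : Prop :=
  N ≤ 0 ∨ (0 ≤ le ∧ (N - le + 1 ≤ 0 ∨
    (N ≤ (arr.length : Int) ∧ ∀ s ∈ arr.take N.toNat, N ≤ PySem.Str.len s)))
instance (arr : List String) (N : Int) (le : Int) : Decidable (Pre_make_palindrome arr N le) := by
  unfold Pre_make_palindrome; infer_instance

def pvWitness_make_palindrome : List String × Int × Int := (["abca", "bccb", "xccx", "abca"], 4, 4)

def Spec_make_palindrome (arr : List String) (N : Int) (le : Int) (out : Int) : Prop := out = make_palindrome_alt arr N le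
instance (arr : List String) (N : Int) (le : Int) (out : Int) : Decidable (Spec_make_palindrome arr N le out) := by unfold Spec_make_palindrome; infer_instance

-- ===== CLAIM (what is proved, stated in full; the proofs are below) =====
def Claim_equal_make_palindrome : Prop := ∀ (arr : List String) (N : Int) (le : Int), Dom_make_palindrome arr N le → Pre_make_palindrome arr N le → Spec_make_palindrome arr N le (make_palindrome arr N le)

-- ===== LEMMAS AND PROOFS =====

-- the mirrored-half test, as a Bool predicate both counts reduce to
def pvHalf (s : List Char) (l j : Int) : Bool :=
  (PySem.List.pyRange 0 (PySem.Int.floordiv l 2)).all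
    (fun k => PySem.List.pyGetD s (j + k) ' ' == PySem.List.pyGetD s (j + l - 1 - k) ' ')

-- A's break-loop reaches the full length iff no comparison fires
theorem pvBrk_eq_length_iff (cmp : Int → Bool) (l : List Int) :
    pvBrk cmp l = (l.length : Int) ↔ ∀ k ∈ l, cmp k = false := by
  induction l with
  | nil => simp [pvBrk]
  | cons k ks ih =>
    have hle : pvBrk cmp ks ≤ (ks.length : Int) := by
      clear ih
      induction ks with
      | nil => simp [pvBrk]
      | cons a t iht => simp only [pvBrk]; split <;> simp <;> omega
    simp only [pvBrk, List.length_cons, List.mem_cons]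
    constructor
    · intro hEq
      by_cases hc : cmp k
      · simp [hc] at hEq; omega
      · simp [hc] at hEq
        have hall := ih.mp (by omega)
        rintro x (rfl | hx)
        · simpa using hc
        · exact hall x hx
    · intro hAll
      have hk : cmp k = false := hAll k (Or.inl rfl)
      have h2 : pvBrk cmp ks = (ks.length : Int) := ih.mpr (fun x hx => hAll x (Or.inr hx))
      simp [hk, h2]
      ring

-- base layer: windows of length 0 or 1 are palindromes
theorem pvHalf_base (s : List Char) (l j : Int) (h0 : 0 ≤ l) (h1 : l ≤ 1) :
    pvHalf s l j = true := by
  have hfd : PySem.Int.floordiv l 2 = 0 := by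
    rw [PySem.Int.floordiv_eq_ediv_of_pos (by omega)]; omega
  simp only [pvHalf, hfd, PySem.List.pyRange_one_eq_nil (le_refl 0), List.all_nil]

-- DP step: a window of length l+2 mirrors iff its ends agree and its interior mirrors
theorem pvHalf_step (s : List Char) (l j : Int) (hl : 0 ≤ l) :
    pvHalf s (l + 2) j =
      ((PySem.List.pyGetD s j ' ' == PySem.List.pyGetD s (j + l + 1) ' ') &&
        pvHalf s l (j + 1)) := by
  have h2 : PySem.Int.floordiv (l + 2) 2 = PySem.Int.floordiv l 2 + 1 := by
    rw [PySem.Int.floordiv_eq_ediv_of_pos (by omega), PySem.Int.floordiv_eq_ediv_of_pos (by omega)]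
    omega
  have hh0 : 0 ≤ PySem.Int.floordiv l 2 := by
    rw [PySem.Int.floordiv_eq_ediv_of_pos (by omega)]; omega
  rw [Bool.eq_iff_iff]
  simp only [pvHalf, h2, List.all_eq_true, PySem.List.mem_pyRange_one, Bool.and_eq_true,
    beq_iff_eq]
  constructor
  · intro H
    refine ⟨?_, fun k hk => ?_⟩
    · have := H 0 ⟨le_refl 0, by omega⟩
      simpa [show j + (l + 2) - 1 - 0 = j + l + 1 by ring] using this
    · have := H (k + 1) ⟨by omega, by omega⟩
      rw [show j + (k + 1) = j + 1 + k by ring,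
          show j + (l + 2) - 1 - (k + 1) = j + 1 + l - 1 - k by ring] at this
      exact this
  · rintro ⟨hend, hin⟩ k hk
    rcases eq_or_lt_of_le hk.1 with hk0 | hk0
    · rw [← hk0]
      simpa [show j + (l + 2) - 1 - 0 = j + l + 1 by ring] using hend
    · have := hin (k - 1) ⟨by omega, by omega⟩
      rw [show j + 1 + (k - 1) = j + k by ring,
          show j + 1 + l - 1 - (k - 1) = j + (l + 2) - 1 - k by ring] at this
      exact this

-- the while loop maintains 'pal is the pvHalf table of the current layer'
theorem pvLayers_eq (s : List Char) (N : Int) (fuel : Nat) :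
    ∀ l : Int, 0 ≤ l → l + 2 * (fuel : Int) ≤ N →
      pvLayers s N fuel l ((PySem.List.pyRange 0 (N - l + 1)).map (fun j => pvHalf s l j)) =
        (PySem.List.pyRange 0 (N - (l + 2 * (fuel : Int)) + 1)).map
          (fun j => pvHalf s (l + 2 * (fuel : Int)) j) := by
  induction fuel with
  | zero => intro l _ _; simp [pvLayers]
  | succ n ih =>
    intro l hl hN
    have hcast : ((n + 1 : Nat) : Int) = (n : Int) + 1 := by push_cast; ring
    have hstep : pvLayerStep s N (l + 2)
        ((PySem.List.pyRange 0 (N - l + 1)).map (fun j => pvHalf s l j)) =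
        (PySem.List.pyRange 0 (N - (l + 2) + 1)).map (fun j => pvHalf s (l + 2) j) := by
      unfold pvLayerStep
      apply List.map_congr_left
      intro j hj
      rw [PySem.List.mem_pyRange_one] at hj
      have hlen : ((PySem.List.pyRange 0 (N - l + 1)).map (fun j => pvHalf s l j)).length
          = (N - l + 1).toNat := by
        rw [List.length_map, PySem.List.length_pyRange_one]; omega
      have hget : PySem.List.pyGetD
          ((PySem.List.pyRange 0 (N - l + 1)).map (fun j => pvHalf s l j)) (j + 1) false
          = pvHalf s l (j + 1) := by
        rw [PySem.List.pyGetD_eq_getElem _ _ (by omega) (by rw [hlen]; omega)]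
        rw [List.getElem_map, PySem.List.getElem_pyRange_one]
        congr 1
        omega
      rw [hget, pvHalf_step s l j hl, Bool.and_comm]
      congr 2
      ring
    show pvLayers s N n (l + 2) _ = _
    rw [hstep, hcast, show l + 2 * ((n : Int) + 1) = (l + 2) + 2 * (n : Int) by ring]
    exact ih (l + 2) (by omega) (by rw [hcast] at hN; omega)

-- per-window bridge: A's break-counter test is B's pvHalf test
theorem window_iff (g : Int → Char) (s : List Char) (N le j : Int)
    (hle : 0 ≤ le)
    (hg : ∀ x : Int, 0 ≤ x → x < N → g x = PySem.List.pyGetD s x ' ')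
    (hj0 : 0 ≤ j) (hjN : j + le ≤ N) :
    (pvBrk (fun k => g (j + k) != g (j + le - 1 - k))
        (PySem.List.pyRange 0 (PySem.Int.floordiv le 2)) = PySem.Int.floordiv le 2
      ↔ pvHalf s le j = true) := by
  have hfd : PySem.Int.floordiv le 2 = le / 2 := PySem.Int.floordiv_eq_ediv_of_pos (by omega)
  have hlen : ((PySem.List.pyRange 0 (PySem.Int.floordiv le 2)).length : Int)
      = PySem.Int.floordiv le 2 := by
    rw [PySem.List.length_pyRange_one, hfd]
    omega
  have hiff := pvBrk_eq_length_iff (fun k => g (j + k) != g (j + le - 1 - k))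
      (PySem.List.pyRange 0 (PySem.Int.floordiv le 2))
  rw [hlen] at hiff
  rw [hiff]
  simp only [pvHalf, List.all_eq_true, PySem.List.mem_pyRange_one, beq_iff_eq]
  constructor
  · intro H k hk
    have h1 := H k hk
    rw [bne_eq_false_iff_eq] at h1
    rw [hfd] at hk
    rwa [hg _ (by omega) (by omega), hg _ (by omega) (by omega)] at h1
  · intro H k hk
    have h1 := H k hk
    rw [hfd] at hk
    rw [bne_eq_false_iff_eq, hg _ (by omega) (by omega), hg _ (by omega) (by omega)]
    exact h1

-- per-line bridge: A's inner window loop adds B's per-line DP count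
theorem line_fold (g : Int → Char) (s : List Char) (N le : Int)
    (hle : 0 ≤ le) (hleN : le ≤ N) (hs : (s.length : Int) = N)
    (hg : ∀ x : Int, 0 ≤ x → x < N → g x = PySem.List.pyGetD s x ' ') (a : Int) :
    (PySem.List.pyRange 0 (N - le + 1)).foldl (fun a j =>
        if pvBrk (fun k => g (j + k) != g (j + le - 1 - k))
            (PySem.List.pyRange 0 (PySem.Int.floordiv le 2)) = PySem.Int.floordiv le 2
        then a + 1 else a) a
      = a + (((pvLayers s N ((le - PySem.Int.mod le 2) / 2).toNat (PySem.Int.mod le 2)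
              (List.replicate (N - PySem.Int.mod le 2 + 1).toNat true)).countP id : Nat) : Int) := by
  have hm : PySem.Int.mod le 2 = le % 2 := PySem.Int.mod_eq_emod_of_pos (by omega)
  rw [hm]
  have hl01 : 0 ≤ le % 2 := by omega
  have hl02 : le % 2 ≤ 1 := by omega
  have hfuel : le % 2 + 2 * ((((le - le % 2) / 2).toNat : Int)) = le := by omega
  have hinit : List.replicate (N - le % 2 + 1).toNat true =
      (PySem.List.pyRange 0 (N - le % 2 + 1)).map (fun j => pvHalf s (le % 2) j) := by
    rw [List.map_congr_left (g := fun _ => true)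
        (fun j _ => pvHalf_base s (le % 2) j hl01 hl02)]
    rw [List.map_const', PySem.List.length_pyRange_one]
    congr 1
    omega
  rw [hinit, pvLayers_eq s N _ _ hl01 (by rw [hfuel]; omega), hfuel]
  rw [PySem.List.foldl_ite_add_one]
  congr 2
  rw [List.countP_map]
  apply List.countP_congr
  intro j hj
  rw [PySem.List.mem_pyRange_one] at hj
  have hw := window_iff g s N le j hle hg (by omega) (by omega)
  simp only [Function.comp, id_eq]
  rw [Bool.eq_iff_iff]
  simpa using hw

-- folding an accumulator-preserving function is the identity
theorem foldl_id {α : Type} (l : List α) (a : Int) :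
    l.foldl (fun a (_ : α) => a) a = a := by
  induction l generalizing a with
  | nil => rfl
  | cons x xs ih => simpa using ih a

-- ===== VERDICT (by name: the statement is the Claim_ definition above) =====
theorem make_palindrome_spec : Claim_equal_make_palindrome := by
  intro arr N le _ hpre
  unfold Pre_make_palindrome at hpre
  unfold Spec_make_palindrome
  by_cases hm : N - le + 1 ≤ 0
  · -- no windows: A adds nothing, B's guard returns 0
    have hnil : PySem.List.pyRange 0 (N - le + 1) = [] := PySem.List.pyRange_one_eq_nil (by omega)
    simp only [make_palindrome, make_palindrome_alt, hnil, List.foldl_nil, if_pos hm]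
    rw [foldl_id, foldl_id]
  · by_cases hN : N ≤ 0
    · -- N ≤ 0: both scans traverse nothing
      simp [make_palindrome, make_palindrome_alt, PySem.List.pyRange_one_eq_nil hN]
    · have hN' : 0 < N := by omega
      rcases hpre with h0 | ⟨hle, hm' | ⟨hlen, hrows⟩⟩
      · omega
      · omega
      have hleN : le ≤ N := by omega
      have hrowlen : ∀ i : Int, 0 ≤ i → i < N →
          N ≤ ((PySem.List.pyGetD arr i "").toList.length : Int) := by
        intro i h1 h2
        rw [PySem.List.pyGetD_eq_getElem arr "" h1 (by omega)]
        have h3 : i.toNat < (arr.take N.toNat).length := by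
          rw [List.length_take]; omega
        have hmem : arr[i.toNat] ∈ arr.take N.toNat := by
          have h4 := List.getElem_take (xs := arr) (h := h3)
          rw [← h4]
          exact List.getElem_mem h3
        have := hrows _ hmem
        rwa [PySem.Str.len_eq] at this
      set rows := (PySem.List.pyRange 0 N).map (fun i =>
          PySem.List.slice (PySem.List.pyGetD arr i "").toList none (some N)) with hrowsdef
      have hrow_i : ∀ i : Int, 0 ≤ i → i < N →
          PySem.List.pyGetD rows i [] =
            (PySem.List.pyGetD arr i "").toList.take N.toNat := by
        intro i h1 h2
        rw [hrowsdef, PySem.List.pyGetD_eq_getElem _ _ h1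
              (by rw [List.length_map, PySem.List.length_pyRange_one]; omega),
            List.getElem_map, PySem.List.getElem_pyRange_one,
            PySem.List.slice_to _ (by omega)]
        rw [zero_add, Int.toNat_of_nonneg h1]
      have hrowf_len : ∀ i : Int, 0 ≤ i → i < N →
          (((PySem.List.slice (PySem.List.pyGetD arr i "").toList none (some N)).length : Int)) = N := by
        intro i h1 h2
        rw [PySem.List.slice_to _ (by omega), List.length_take]
        have := hrowlen i h1 h2
        omega
      have hrow_g : ∀ i : Int, 0 ≤ i → i < N → ∀ x : Int, 0 ≤ x → x < N →
          pvAt arr i x =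
          PySem.List.pyGetD (PySem.List.slice (PySem.List.pyGetD arr i "").toList none (some N)) x ' ' := by
        intro i hi1 hi2 x hx1 hx2
        have hll := hrowlen i hi1 hi2
        rw [PySem.List.slice_to _ (by omega), pvAt,
            PySem.List.pyGetD_eq_getElem _ _ hx1 (by omega),
            PySem.List.pyGetD_eq_getElem _ _ hx1 (by rw [List.length_take]; omega),
            List.getElem_take]
      set cols := (PySem.List.pyRange 0 N).map (fun j =>
          rows.map (fun row => PySem.List.pyGetD row j ' ')) with hcolsdef
      have hcol_len : ∀ j : Int,
          (((rows.map (fun row => PySem.List.pyGetD row j ' ')).length : Int)) = N := by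
        intro j
        rw [List.length_map, hrowsdef, List.length_map, PySem.List.length_pyRange_one]
        omega
      have hcol_g : ∀ j : Int, 0 ≤ j → j < N → ∀ x : Int, 0 ≤ x → x < N →
          pvAt arr x j =
            PySem.List.pyGetD (rows.map (fun row => PySem.List.pyGetD row j ' ')) x ' ' := by
        intro j hj1 hj2 x hx1 hx2
        have hrl : rows.length = N.toNat := by
          rw [hrowsdef, List.length_map, PySem.List.length_pyRange_one]; omega
        rw [PySem.List.pyGetD_eq_getElem _ _ hx1 (by rw [List.length_map, hrl]; omega),
            List.getElem_map]
        have hxel : rows[x.toNat] = PySem.List.pyGetD rows x [] := by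
          rw [PySem.List.pyGetD_eq_getElem _ _ hx1 (by rw [hrl]; omega)]
        rw [hxel, hrow_i x hx1 hx2]
        have hll := hrowlen x hx1 hx2
        rw [pvAt, PySem.List.pyGetD_eq_getElem _ _ hj1 (by omega),
            PySem.List.pyGetD_eq_getElem _ _ hj1 (by rw [List.length_take]; omega),
            List.getElem_take]
      -- unfold both ports and reduce each scan to a sum of per-line counts
      simp only [make_palindrome, make_palindrome_alt, if_neg hm]
      rw [List.foldl_append]
      rw [PySem.List.foldl_congr_mem _ _
          (fun a i => a +
            (((pvLayers (PySem.List.slice (PySem.List.pyGetD arr i "").toList none (some N)) N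
                ((le - PySem.Int.mod le 2) / 2).toNat (PySem.Int.mod le 2)
                (List.replicate (N - PySem.Int.mod le 2 + 1).toNat true)).countP id : Nat) : Int)) 0
          (by
            intro a i hi
            rw [PySem.List.mem_pyRange_one] at hi
            exact line_fold (fun x => pvAt arr i x) _ N le hle hleN (hrowf_len i hi.1 hi.2)
              (fun x h1 h2 => hrow_g i hi.1 hi.2 x h1 h2) a),
        PySem.List.foldl_add]
      rw [PySem.List.foldl_congr_mem _ _
          (fun a j => a +
            (((pvLayers (rows.map (fun row => PySem.List.pyGetD row j ' ')) N
                ((le - PySem.Int.mod le 2) / 2).toNat (PySem.Int.mod le 2)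
                (List.replicate (N - PySem.Int.mod le 2 + 1).toNat true)).countP id : Nat) : Int)) _
          (by
            intro a j hj
            rw [PySem.List.mem_pyRange_one] at hj
            exact line_fold (fun x => pvAt arr x j) _ N le hle hleN (hcol_len j)
              (fun x h1 h2 => hcol_g j hj.1 hj.2 x h1 h2) a),
        PySem.List.foldl_add]
      rw [PySem.List.foldl_add, PySem.List.foldl_add]
      simp only [hrowsdef, List.map_map, Function.comp_def, zero_add]
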